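-- pv_equiv track=rewrite | github.com/eliotte0106/CSC1301 | HW04.py | groceryShopping
-- ===== SOURCE A (Python) =====
-- def groceryShopping(groceryList,priceList,budget):
--     if len(groceryList) <= 0 or len(priceList) <= 0 or (len(groceryList) != len(priceList)) or budget < 0:
--         return
--     result = []
--     for i in range(len(groceryList)):
--         if priceList[i] > budget:
--             return result
--         elif budget >= priceList[i]:
--             result.append((groceryList[i],priceList[i]))
--             budget -= priceList[i]
--     return result
-- ===== SOURCE B (Python) =====
-- def groceryShopping(groceryList, priceList, budget):
--     if len(groceryList) <= 0 or len(priceList) <= 0 or len(groceryList) != len(priceList) or budget < 0: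
--         return None
--     # remaining[i] = budget left just before considering item i
--     remaining = [budget]
--     for p in priceList:
--         remaining.append(remaining[-1] - p)
--     k = 0
--     while k < len(priceList) and priceList[k] <= remaining[k]:
--         k += 1
--     return list(zip(groceryList[:k], priceList[:k]))
-- ===== Notes on version B (the rewrite author's own statement) =====
-- stated objective: alternative
-- what changed: Replaces the fused append/early-return loop by building the running remaining-budget table in one pass, then finding the affordable-prefix length and zipping the two truncated lists.
import Mathlib
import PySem

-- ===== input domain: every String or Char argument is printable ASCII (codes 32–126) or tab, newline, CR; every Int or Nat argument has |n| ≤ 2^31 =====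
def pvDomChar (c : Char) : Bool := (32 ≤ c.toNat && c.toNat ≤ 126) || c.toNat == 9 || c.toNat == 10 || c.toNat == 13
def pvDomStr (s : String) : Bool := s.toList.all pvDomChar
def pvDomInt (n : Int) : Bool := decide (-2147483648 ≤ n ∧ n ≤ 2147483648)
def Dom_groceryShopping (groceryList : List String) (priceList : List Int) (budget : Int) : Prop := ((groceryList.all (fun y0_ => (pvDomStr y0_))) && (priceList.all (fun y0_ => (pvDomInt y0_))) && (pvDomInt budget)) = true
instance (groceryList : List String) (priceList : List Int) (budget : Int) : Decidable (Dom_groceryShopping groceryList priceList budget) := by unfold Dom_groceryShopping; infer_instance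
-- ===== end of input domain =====

-- B replaces A's fused append/early-return loop by a remaining-budget table, a prefix-length scan, and a zip of truncated lists (alternative decomposition, same cost).


-- ===== PORT A =====
-- A's for-loop over i with early return on priceList[i] > budget; since the guard
-- forces equal lengths, the indexed loop is transcribed as recursion on the zipped lists.
def pvLoopA : List (String × Int) → Int → List (String × Int) → List (String × Int)
  | [], _, result => result
  | (g, p) :: rest, budget, result =>
      if p > budget then result
      else pvLoopA rest (budget - p) (result ++ [(g, p)])

def groceryShopping (groceryList : List String) (priceList : List Int) (budget : Int) : Option (List (String × Int)) :=
  if groceryList.length ≤ 0 ∨ priceList.length ≤ 0 ∨ groceryList.length ≠ priceList.length ∨ budget < 0 then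
    none
  else
    some (pvLoopA (groceryList.zip priceList) budget [])

-- ===== PORT B =====
-- remaining-budget table: remaining[i] = budget left just before item i (Source B's append loop)
def pvRemTable : Int → List Int → List Int
  | b, [] => [b]
  | b, p :: ps => b :: pvRemTable (b - p) ps

-- Source B's while loop: count how long priceList[k] <= remaining[k] holds
def pvPrefixLen : List Int → List Int → Nat
  | p :: ps, r :: rs => if p ≤ r then 1 + pvPrefixLen ps rs else 0
  | _, _ => 0

def groceryShopping_alt (groceryList : List String) (priceList : List Int) (budget : Int) : Option (List (String × Int)) :=
  if groceryList.length ≤ 0 ∨ priceList.length ≤ 0 ∨ groceryList.length ≠ priceList.length ∨ budget < 0 then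
    none
  else
    let k := pvPrefixLen priceList (pvRemTable budget priceList)
    some ((groceryList.take k).zip (priceList.take k))

-- ===== PRECONDITION & SPEC =====
def Spec_groceryShopping (groceryList : List String) (priceList : List Int) (budget : Int) (out : Option (List (String × Int))) : Prop := out = groceryShopping_alt groceryList priceList budget
instance (groceryList : List String) (priceList : List Int) (budget : Int) (out : Option (List (String × Int))) : Decidable (Spec_groceryShopping groceryList priceList budget out) := by unfold Spec_groceryShopping; infer_instance

-- ===== CLAIM (what is proved, stated in full; the proofs are below) =====
def Claim_equal_groceryShopping : Prop := ∀ (groceryList : List String) (priceList : List Int) (budget : Int), Dom_groceryShopping groceryList priceList budget → Spec_groceryShopping groceryList priceList budget (groceryShopping groceryList priceList budget)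

-- ===== LEMMAS AND PROOFS =====
theorem pvLoopA_eq (ps : List Int) : ∀ (gs : List String) (b : Int) (acc : List (String × Int)),
    pvLoopA (gs.zip ps) b acc =
      acc ++ ((gs.take (pvPrefixLen ps (pvRemTable b ps))).zip (ps.take (pvPrefixLen ps (pvRemTable b ps)))) := by
  induction ps with
  | nil => intro gs b acc; simp [pvLoopA, pvPrefixLen]
  | cons p ps ih =>
      intro gs b acc
      cases gs with
      | nil => simp [pvLoopA]
      | cons g gs =>
          by_cases h : p ≤ b
          · have hnot : ¬ p > b := not_lt.mpr h
            simp [pvLoopA, pvRemTable, pvPrefixLen, hnot, h, ih gs (b - p) (acc ++ [(g, p)]),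
              Nat.add_comm 1, List.append_assoc]
          · have hgt : p > b := lt_of_not_ge h
            simp [pvLoopA, pvRemTable, pvPrefixLen, hgt, h]

-- ===== VERDICT (by name: the statement is the Claim_ definition above) =====
theorem groceryShopping_spec : Claim_equal_groceryShopping := by
  intro gl pl b _
  unfold Spec_groceryShopping groceryShopping groceryShopping_alt
  split
  · rfl
  · simp [pvLoopA_eq]
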